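-- pv_equiv track=rewrite | github.com/Aeyocca/ff_analysis | optimize_projection.py | convert_dst
-- ===== SOURCE A (Python) =====
-- def convert_dst(proj = dict()):
-- 	#convert projection to salary defense names
-- 	conv_dict = {"Los Angeles (LAR)" : "Los Angeles Rams",
-- 				 "Buffalo (BUF)" : "Buffalo Bills",
-- 				 "San Francisco (SF)" : "San Francisco 49ers",
-- 				 "Pittsburgh (PIT)" : "Pittsburgh Steelers",
-- 				 "Baltimore (BAL)" : "Baltimore Ravens",
-- 				 "Kansas City (KC)" : "Kansas City Chiefs",
-- 				 "Chicago (CHI)" : "Chicago Bears",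
-- 				 "Tennessee (TEN)" : "Tennessee Titans",
-- 				 "New Orleans (NO)" : "New Orleans Saints",
-- 				 "Tampa Bay (TB)" : "Tampa Bay Buccaneers",
-- 				 "Philadelphia (PHI)" : "Philadelphia Eagles",
-- 				 "Indianapolis (IND)" : "Indianapolis Colts",
-- 				 "Arizona (ARI)" : "Arizona Cardinals",
-- 				 "Seattle (SEA)" : "Seattle Seahawks",
-- 				 "New England (NE)" : "New England Patriots",
-- 				 "Green Bay (GB)" : "Green Bay Packers",
-- 				 "Dallas (DAL)" : "Dallas Cowboys",
-- 				 "Washington (WAS)" : "Washington Football Team",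
-- 				 "Minnesota (MIN)" : "Minnesota Vikings",
-- 				 "Denver (DEN)" : "Denver Broncos",
-- 				 "Cleveland (CLE)" : "Cleveland Browns",
-- 				 "Cincinnati (CIN)" : "Cincinnati Bengals",
-- 				 "Miami (MIA)" : "Miami Dolphins",
-- 				 "New York (NYG)" : "New York Giants",
-- 				 "Los Angeles (LAC)" : "Los Angeles Chargers",
-- 				 "New York (NYJ)" : "New York Jets",
-- 				 "Las Vegas (LV)" : "Las Vegas Raiders",
-- 				 "Detroit (DET)" : "Detroit Lions",
-- 				 "Jacksonville (JAC)" : "Jacksonville Jaguars",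
-- 				 "Atlanta (ATL)" : "Atlanta Falcons",
-- 				 "Carolina (CAR)" : "Carolina Panthers",
-- 				 "Houston (HOU)" : "Houston Texans"}
--
-- 	for team in conv_dict.keys():
-- 		proj = proj.replace(team, conv_dict[team])
-- 	return proj
-- ===== SOURCE B (Python) =====
-- def convert_dst(proj = dict()):
-- 	#convert projection to salary defense names: the table is stored as
-- 	#(city, abbreviation, nickname) triples from which key "City (ABB)" and
-- 	#value "City Nickname" are built; the string is rewritten in ONE
-- 	#left-to-right scan, substituting the first key matching at each position.
-- 	teams = [("Los Angeles", "LAR", "Rams"),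
-- 			 ("Buffalo", "BUF", "Bills"),
-- 			 ("San Francisco", "SF", "49ers"),
-- 			 ("Pittsburgh", "PIT", "Steelers"),
-- 			 ("Baltimore", "BAL", "Ravens"),
-- 			 ("Kansas City", "KC", "Chiefs"),
-- 			 ("Chicago", "CHI", "Bears"),
-- 			 ("Tennessee", "TEN", "Titans"),
-- 			 ("New Orleans", "NO", "Saints"),
-- 			 ("Tampa Bay", "TB", "Buccaneers"),
-- 			 ("Philadelphia", "PHI", "Eagles"),
-- 			 ("Indianapolis", "IND", "Colts"),
-- 			 ("Arizona", "ARI", "Cardinals"),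
-- 			 ("Seattle", "SEA", "Seahawks"),
-- 			 ("New England", "NE", "Patriots"),
-- 			 ("Green Bay", "GB", "Packers"),
-- 			 ("Dallas", "DAL", "Cowboys"),
-- 			 ("Washington", "WAS", "Football Team"),
-- 			 ("Minnesota", "MIN", "Vikings"),
-- 			 ("Denver", "DEN", "Broncos"),
-- 			 ("Cleveland", "CLE", "Browns"),
-- 			 ("Cincinnati", "CIN", "Bengals"),
-- 			 ("Miami", "MIA", "Dolphins"),
-- 			 ("New York", "NYG", "Giants"),
-- 			 ("Los Angeles", "LAC", "Chargers"),
-- 			 ("New York", "NYJ", "Jets"),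
-- 			 ("Las Vegas", "LV", "Raiders"),
-- 			 ("Detroit", "DET", "Lions"),
-- 			 ("Jacksonville", "JAC", "Jaguars"),
-- 			 ("Atlanta", "ATL", "Falcons"),
-- 			 ("Carolina", "CAR", "Panthers"),
-- 			 ("Houston", "HOU", "Texans")]
-- 	table = [(city + " (" + abbr + ")", city + " " + nick)
-- 			 for city, abbr, nick in teams]
--
-- 	out = []
-- 	i = 0
-- 	n = len(proj)
-- 	while i < n:
-- 		for key, val in table:
-- 			if proj.startswith(key, i):
-- 				out.append(val)
-- 				i += len(key)
-- 				break
-- 		else: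
-- 			out.append(proj[i])
-- 			i += 1
-- 	return "".join(out)
-- ===== Notes on version B (the rewrite author's own statement) =====
-- stated objective: alternative
-- what changed: Replaces A's 32 sequential full-string str.replace passes and its literal key/value dict by a (city, abbreviation, nickname) triple table from which keys and values are built, rewritten in one left-to-right scan substituting the first key matching at each position (equivalent because no key can overlap an occurrence of another key or of a replacement value).
import Mathlib
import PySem

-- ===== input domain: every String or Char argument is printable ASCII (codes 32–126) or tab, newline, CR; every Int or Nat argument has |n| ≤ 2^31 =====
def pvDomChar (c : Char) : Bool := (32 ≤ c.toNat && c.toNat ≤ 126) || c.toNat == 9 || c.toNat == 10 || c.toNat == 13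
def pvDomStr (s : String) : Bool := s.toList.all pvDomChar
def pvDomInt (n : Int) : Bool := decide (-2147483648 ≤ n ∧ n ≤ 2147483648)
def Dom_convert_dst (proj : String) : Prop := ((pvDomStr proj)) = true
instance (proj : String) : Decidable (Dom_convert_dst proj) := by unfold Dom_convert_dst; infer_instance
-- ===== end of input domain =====

-- B stores the table as (city, abbr, nickname) triples and rewrites the string in one
-- left-to-right scan instead of A's 32 sequential full-string replace passes (alternative algorithm, same result).

-- ===== PORT A =====
-- A's literal conversion dict (insertion order)
def pvConvDict : List (String × String) :=
  [("Los Angeles (LAR)", "Los Angeles Rams"),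
   ("Buffalo (BUF)", "Buffalo Bills"),
   ("San Francisco (SF)", "San Francisco 49ers"),
   ("Pittsburgh (PIT)", "Pittsburgh Steelers"),
   ("Baltimore (BAL)", "Baltimore Ravens"),
   ("Kansas City (KC)", "Kansas City Chiefs"),
   ("Chicago (CHI)", "Chicago Bears"),
   ("Tennessee (TEN)", "Tennessee Titans"),
   ("New Orleans (NO)", "New Orleans Saints"),
   ("Tampa Bay (TB)", "Tampa Bay Buccaneers"),
   ("Philadelphia (PHI)", "Philadelphia Eagles"),
   ("Indianapolis (IND)", "Indianapolis Colts"),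
   ("Arizona (ARI)", "Arizona Cardinals"),
   ("Seattle (SEA)", "Seattle Seahawks"),
   ("New England (NE)", "New England Patriots"),
   ("Green Bay (GB)", "Green Bay Packers"),
   ("Dallas (DAL)", "Dallas Cowboys"),
   ("Washington (WAS)", "Washington Football Team"),
   ("Minnesota (MIN)", "Minnesota Vikings"),
   ("Denver (DEN)", "Denver Broncos"),
   ("Cleveland (CLE)", "Cleveland Browns"),
   ("Cincinnati (CIN)", "Cincinnati Bengals"),
   ("Miami (MIA)", "Miami Dolphins"),
   ("New York (NYG)", "New York Giants"),
   ("Los Angeles (LAC)", "Los Angeles Chargers"),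
   ("New York (NYJ)", "New York Jets"),
   ("Las Vegas (LV)", "Las Vegas Raiders"),
   ("Detroit (DET)", "Detroit Lions"),
   ("Jacksonville (JAC)", "Jacksonville Jaguars"),
   ("Atlanta (ATL)", "Atlanta Falcons"),
   ("Carolina (CAR)", "Carolina Panthers"),
   ("Houston (HOU)", "Houston Texans")]

-- A: for team in conv_dict.keys(): proj = proj.replace(team, conv_dict[team])
def convert_dst (proj : String) : String :=
  pvConvDict.foldl (fun s kv => PySem.Str.replace s kv.1 kv.2) proj

-- ===== PORT B =====
-- B's data: (city, abbreviation, nickname) triples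
def pvTeams : List (String × String × String) :=
  [("Los Angeles", "LAR", "Rams"),
   ("Buffalo", "BUF", "Bills"),
   ("San Francisco", "SF", "49ers"),
   ("Pittsburgh", "PIT", "Steelers"),
   ("Baltimore", "BAL", "Ravens"),
   ("Kansas City", "KC", "Chiefs"),
   ("Chicago", "CHI", "Bears"),
   ("Tennessee", "TEN", "Titans"),
   ("New Orleans", "NO", "Saints"),
   ("Tampa Bay", "TB", "Buccaneers"),
   ("Philadelphia", "PHI", "Eagles"),
   ("Indianapolis", "IND", "Colts"),
   ("Arizona", "ARI", "Cardinals"),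
   ("Seattle", "SEA", "Seahawks"),
   ("New England", "NE", "Patriots"),
   ("Green Bay", "GB", "Packers"),
   ("Dallas", "DAL", "Cowboys"),
   ("Washington", "WAS", "Football Team"),
   ("Minnesota", "MIN", "Vikings"),
   ("Denver", "DEN", "Broncos"),
   ("Cleveland", "CLE", "Browns"),
   ("Cincinnati", "CIN", "Bengals"),
   ("Miami", "MIA", "Dolphins"),
   ("New York", "NYG", "Giants"),
   ("Los Angeles", "LAC", "Chargers"),
   ("New York", "NYJ", "Jets"),
   ("Las Vegas", "LV", "Raiders"),
   ("Detroit", "DET", "Lions"),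
   ("Jacksonville", "JAC", "Jaguars"),
   ("Atlanta", "ATL", "Falcons"),
   ("Carolina", "CAR", "Panthers"),
   ("Houston", "HOU", "Texans")]

-- Source B: table = [(city + " (" + abbr + ")", city + " " + nick) for ...], as char lists
def pvTable : List (List Char × List Char) :=
  pvTeams.map (fun t =>
    ((t.1 ++ " (" ++ t.2.1 ++ ")").toList, (t.1 ++ " " ++ t.2.2).toList))

-- B's while loop: at position i try each (key, val) in order (proj.startswith(key, i));
-- on the first hit emit val and jump past the key, otherwise emit proj[i] and advance by one.
def pvScan (t : List (List Char × List Char)) : List Char → List Char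
  | [] => []
  | c :: cs =>
    match t.find? (fun kv => kv.1.isPrefixOf (c :: cs)) with
    | some kv => kv.2 ++ pvScan t (cs.drop (kv.1.length - 1))
    | none => c :: pvScan t cs
termination_by s => s.length
decreasing_by
  · simp only [List.length_drop, List.length_cons]; omega
  · simp

def convert_dst_alt (proj : String) : String :=
  String.ofList (pvScan pvTable proj.toList)

-- ===== PRECONDITION & SPEC =====
def Spec_convert_dst (proj : String) (out : String) : Prop := out = convert_dst_alt proj
instance (proj : String) (out : String) : Decidable (Spec_convert_dst proj out) := by unfold Spec_convert_dst; infer_instance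

-- ===== CLAIM (what is proved, stated in full; the proofs are below) =====
def Claim_equal_convert_dst : Prop := ∀ (proj : String), Dom_convert_dst proj → Spec_convert_dst proj (convert_dst proj)

-- ===== LEMMAS AND PROOFS =====

-- the left-to-right semantics of Python's s.replace(k, v) for a single nonempty key k
def pvScan1 (k v : List Char) : List Char → List Char
  | [] => []
  | c :: cs =>
    if k.isPrefixOf (c :: cs) then v ++ pvScan1 k v (cs.drop (k.length - 1))
    else c :: pvScan1 k v cs
termination_by s => s.length
decreasing_by
  · simp only [List.length_drop, List.length_cons]; omega
  · simp

theorem pv_go_eq (k v : List Char) (hk : k ≠ []) :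
    ∀ (fuel : Nat) (l acc : List Char), l.length ≤ fuel →
      PySem.Chars.replace.go k v fuel l acc = acc.reverse ++ pvScan1 k v l := by
  intro fuel
  induction fuel with
  | zero =>
    intro l acc hl
    have : l = [] := by cases l <;> simp_all
    subst this
    simp [PySem.Chars.replace.go, pvScan1]
  | succ n ih =>
    intro l acc hl
    cases l with
    | nil => simp [PySem.Chars.replace.go, pvScan1]
    | cons c t =>
      obtain ⟨m, hm⟩ : ∃ m, k.length = m + 1 := by
        cases k with
        | nil => exact absurd rfl hk
        | cons a b => exact ⟨b.length, rfl⟩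
      by_cases hp : k.isPrefixOf (c :: t)
      · rw [show PySem.Chars.replace.go k v (n+1) (c :: t) acc
            = PySem.Chars.replace.go k v n (List.drop k.length (c :: t)) (v.reverse ++ acc) by
              simp [PySem.Chars.replace.go, hp]]
        rw [ih _ _ (by simp [hm] at hl ⊢; omega)]
        rw [show pvScan1 k v (c :: t) = v ++ pvScan1 k v (t.drop (k.length - 1)) by
              rw [pvScan1]; simp [hp]]
        rw [show List.drop k.length (c :: t) = t.drop (k.length - 1) by
              rw [hm]; simp]
        simp
      · rw [show PySem.Chars.replace.go k v (n+1) (c :: t) acc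
            = PySem.Chars.replace.go k v n t (c :: acc) by
              simp [PySem.Chars.replace.go, hp]]
        rw [ih _ _ (by simp at hl ⊢; omega)]
        rw [show pvScan1 k v (c :: t) = c :: pvScan1 k v t by
              rw [pvScan1]; simp [hp]]
        simp

theorem pv_replace_eq (k v s : List Char) (hk : k ≠ []) :
    PySem.Chars.replace s k v = pvScan1 k v s := by
  unfold PySem.Chars.replace
  rw [if_neg (by simpa [List.isEmpty_iff] using hk)]
  simpa using pv_go_eq k v hk s.length s [] le_rfl

theorem pvScan_nil_table : ∀ s, pvScan [] s = s := by
  intro s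
  induction s with
  | nil => simp [pvScan]
  | cons c cs ih => rw [pvScan]; simp [ih]

-- M: no key of t can start inside v, so scanning v ++ X copies v verbatim
theorem pvM (t : List (List Char × List Char)) (v : List Char)
    (hA2 : ∀ kv ∈ t, ∀ p, p < v.length → ¬ kv.1 <+: v.drop p ∧ ¬ v.drop p <+: kv.1) :
    ∀ X, pvScan t (v ++ X) = v ++ pvScan t X := by
  induction v with
  | nil => intro X; simp
  | cons c v' ih =>
    intro X
    have hnone : t.find? (fun kv => kv.1.isPrefixOf (c :: (v' ++ X))) = none := by
      rw [List.find?_eq_none]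
      intro kv hkv
      simp only [List.isPrefixOf_iff_prefix]
      intro hpre
      have h0 := hA2 kv hkv 0 (by simp)
      simp only [List.drop_zero] at h0
      by_cases hlen : kv.1.length ≤ (c :: v').length
      · exact h0.1 (List.prefix_of_prefix_length_le hpre (List.prefix_append _ _) hlen)
      · exact h0.2 (List.prefix_of_prefix_length_le (List.prefix_append _ _) hpre (by omega))
    rw [show ((c :: v') ++ X) = c :: (v' ++ X) by simp]
    rw [pvScan, hnone]
    rw [ih (fun kv hkv p hp => by
      have := hA2 kv hkv (p+1) (by simp; omega)
      simpa using this)]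
    simp

-- N: if k matches nowhere among the first m positions, the scan copies those m characters
theorem pvN (k v : List Char) :
    ∀ (m : Nat) (s : List Char), m ≤ s.length → (∀ p, p < m → ¬ k <+: s.drop p) →
      pvScan1 k v s = s.take m ++ pvScan1 k v (s.drop m) := by
  intro m
  induction m with
  | zero => intro s _ _; simp
  | succ n ih =>
    intro s hm hp
    cases s with
    | nil => simp at hm
    | cons c cs =>
      have h0 : ¬ k <+: (c :: cs) := by simpa using hp 0 (by omega)
      rw [show pvScan1 k v (c :: cs) = c :: pvScan1 k v cs by
            rw [pvScan1]; simp [List.isPrefixOf_iff_prefix, h0]]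
      rw [ih cs (by simpa using hm) (fun p hplt => by simpa using hp (p+1) (by omega))]
      simp

-- Q: a key k' matching the scan image at a position where neither k nor k' matched
--    the original must match the original string
theorem pvQ (k v k' : List Char)
    (hA5 : ∀ q, 1 ≤ q → q < k'.length → ¬ k'.drop q <+: v ∧ ¬ v <+: k'.drop q) :
    ∀ (s : List Char) (p : Nat), (p = 0 → ¬ k <+: s) → k'.drop p ≠ [] →
      k'.drop p <+: pvScan1 k v s → k'.drop p <+: s := by
  intro s
  induction s with
  | nil =>
    intro p _ hne hpre
    rw [show pvScan1 k v [] = [] by rw [pvScan1]] at hpre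
    exact absurd (List.prefix_nil.mp hpre) hne
  | cons c cs ih =>
    intro p hp0 hne hpre
    by_cases hkp : k <+: (c :: cs)
    · -- k matches here, so the image continues with v; p must be ≥ 1
      have hp1 : 1 ≤ p := by
        by_contra h
        exact hp0 (by omega) hkp
      have hplt : p < k'.length := by
        by_contra h
        exact hne (List.drop_eq_nil_of_le (by omega))
      rw [show pvScan1 k v (c :: cs) = v ++ pvScan1 k v (cs.drop (k.length - 1)) by
            rw [pvScan1]; simp [List.isPrefixOf_iff_prefix, hkp]] at hpre
      have h5 := hA5 p hp1 hplt
      by_cases hlen : (k'.drop p).length ≤ v.length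
      · exact absurd (List.prefix_of_prefix_length_le hpre (List.prefix_append _ _) hlen) h5.1
      · exact absurd (List.prefix_of_prefix_length_le (List.prefix_append _ _) hpre (by omega)) h5.2
    · rw [show pvScan1 k v (c :: cs) = c :: pvScan1 k v cs by
            rw [pvScan1]; simp [List.isPrefixOf_iff_prefix, hkp]] at hpre
      cases hu : k'.drop p with
      | nil => exact absurd hu hne
      | cons a u' =>
        rw [hu] at hpre
        obtain ⟨hac, hu'⟩ := List.cons_prefix_cons.mp hpre
        have hu'eq : u' = k'.drop (p+1) := by
          have h := List.tail_drop (l := k') (i := p)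
          rw [hu] at h
          simpa using h
        by_cases hu'nil : u' = []
        · subst hu'nil
          simp [hac]
        · have hrec := ih (p+1) (by omega) (by rw [← hu'eq]; exact hu'nil) (by rw [← hu'eq]; exact hu')
          refine List.cons_prefix_cons.mpr ⟨hac, ?_⟩
          rw [hu'eq]
          exact hrec

-- the main step: scanning with table ((k,v)::t) = scanning with t after one replace pass for k
theorem pvStep (k v : List Char) (t : List (List Char × List Char))
    (hk : k ≠ [])
    (ht : ∀ kv ∈ t, kv.1 ≠ [])
    (hA2 : ∀ kv ∈ t, ∀ p, p < v.length → ¬ kv.1 <+: v.drop p ∧ ¬ v.drop p <+: kv.1)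
    (hA3 : ∀ kv ∈ t, ∀ q, 1 ≤ q → q < kv.1.length → ¬ k <+: kv.1.drop q ∧ ¬ kv.1.drop q <+: k)
    (hA5 : ∀ kv ∈ t, ∀ q, 1 ≤ q → q < kv.1.length → ¬ kv.1.drop q <+: v ∧ ¬ v <+: kv.1.drop q)
    (hA4 : ∀ kv ∈ t, ¬ k <+: kv.1 ∧ ¬ kv.1 <+: k)
    (hpair : t.Pairwise (fun a b => ¬ a.1 <+: b.1 ∧ ¬ b.1 <+: a.1)) :
    ∀ (n : Nat) (s : List Char), s.length ≤ n →
      pvScan t (pvScan1 k v s) = pvScan ((k,v) :: t) s := by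
  intro n
  induction n with
  | zero =>
    intro s hs
    have : s = [] := by cases s <;> simp_all
    subst this
    rw [show pvScan1 k v [] = [] by rw [pvScan1]]
    rw [show pvScan t [] = [] by rw [pvScan]]
    rw [show pvScan ((k,v)::t) [] = [] by rw [pvScan]]
  | succ n ih =>
    intro s hs
    cases s with
    | nil =>
      rw [show pvScan1 k v [] = [] by rw [pvScan1]]
      rw [show pvScan t [] = [] by rw [pvScan]]
      rw [show pvScan ((k,v)::t) [] = [] by rw [pvScan]]
    | cons c cs =>
      by_cases hkp : k <+: (c :: cs)
      · -- k matches at the head: both sides emit v and continue past it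
        obtain ⟨m, hm⟩ : ∃ m, k.length = m + 1 := by
          cases k with
          | nil => exact absurd rfl hk
          | cons a b => exact ⟨b.length, rfl⟩
        rw [show pvScan1 k v (c :: cs) = v ++ pvScan1 k v (cs.drop (k.length - 1)) by
              rw [pvScan1]; simp [List.isPrefixOf_iff_prefix, hkp]]
        rw [pvM t v hA2]
        rw [ih (cs.drop (k.length - 1)) (by simp only [List.length_cons, List.length_drop] at hs ⊢; omega)]
        rw [show pvScan ((k,v)::t) (c :: cs)
              = v ++ pvScan ((k,v)::t) (cs.drop (k.length - 1)) by
              rw [pvScan]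
              rw [List.find?_cons_of_pos (by simp [List.isPrefixOf_iff_prefix, hkp])]]
      · cases hf : t.find? (fun kv => kv.1.isPrefixOf (c :: cs)) with
        | some kv' =>
          obtain ⟨k', v'⟩ := kv'
          obtain ⟨hpred, t₁, t₂, hsplit, hfail⟩ := List.find?_eq_some_iff_append.mp hf
          simp only [List.isPrefixOf_iff_prefix] at hpred
          have hmem : (k', v') ∈ t := by rw [hsplit]; simp
          have hk'ne : k' ≠ [] := ht _ hmem
          obtain ⟨s₂, hs₂⟩ := hpred
          -- (1) the first |k'| characters are copied verbatim by the k-pass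
          have himg : pvScan1 k v (c :: cs) = k' ++ pvScan1 k v s₂ := by
            have hN := pvN k v k'.length (c :: cs)
              (by rw [← hs₂]; simp)
              (by
                intro p hplt
                cases Nat.eq_zero_or_pos p with
                | inl h0 => subst h0; simpa using hkp
                | inr hpos =>
                  rw [← hs₂, List.drop_append_of_le_length (by omega)]
                  intro hcon
                  have h3 : ¬ k <+: k'.drop p ∧ ¬ k'.drop p <+: k := hA3 (k', v') hmem p hpos hplt
                  by_cases hlen : k.length ≤ (k'.drop p).length
                  · exact h3.1 (List.prefix_of_prefix_length_le hcon (List.prefix_append _ _) hlen)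
                  · exact h3.2 (List.prefix_of_prefix_length_le (List.prefix_append _ _) hcon (by omega)))
            rw [hN, ← hs₂, List.take_left, List.drop_left]
          -- (2) scanning the image with t finds (k', v') first
          have hfind2 : t.find? (fun kv => kv.1.isPrefixOf (k' ++ pvScan1 k v s₂)) = some (k', v') := by
            rw [hsplit, List.find?_append]
            have hn1 : t₁.find? (fun kv => kv.1.isPrefixOf (k' ++ pvScan1 k v s₂)) = none := by
              rw [List.find?_eq_none]
              intro a ha
              simp only [List.isPrefixOf_iff_prefix]
              intro hcon
              have hafail : ¬ a.1 <+: (c :: cs) := by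
                intro hcon2
                have hh := hfail a ha
                rw [Bool.not_eq_true'] at hh
                rw [List.isPrefixOf_iff_prefix.mpr hcon2] at hh
                simp at hh
              by_cases hlen : a.1.length ≤ k'.length
              · exact hafail (by
                  rw [← hs₂]
                  exact (List.prefix_of_prefix_length_le hcon (List.prefix_append _ _) hlen).trans
                    (List.prefix_append _ _))
              · have hpp : ¬ k' <+: a.1 := by
                  have hpw := List.pairwise_append.mp (by rw [hsplit] at hpair; exact hpair)
                  exact (hpw.2.2 a ha (k', v') (by simp)).2
                exact hpp (List.prefix_of_prefix_length_le (List.prefix_append _ _) hcon (by omega))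
            rw [hn1]
            simp [List.isPrefixOf_iff_prefix, List.prefix_append]
          -- unpack k' to evaluate pvScan on the image
          obtain ⟨d, k'', hdk⟩ : ∃ d k'', k' = d :: k'' := by
            cases k' with
            | nil => exact absurd rfl hk'ne
            | cons d k'' => exact ⟨d, k'', rfl⟩
          have himg2 : pvScan t (pvScan1 k v (c :: cs)) = v' ++ pvScan t (pvScan1 k v s₂) := by
            rw [himg, hdk]
            rw [show (d :: k'') ++ pvScan1 k v s₂ = d :: (k'' ++ pvScan1 k v s₂) by simp]
            rw [pvScan]
            rw [show (fun kv : List Char × List Char => kv.1.isPrefixOf (d :: (k'' ++ pvScan1 k v s₂)))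
                  = (fun kv => kv.1.isPrefixOf (k' ++ pvScan1 k v s₂)) by rw [hdk]; simp]
            rw [hfind2]
            simp [hdk]
          rw [himg2]
          rw [ih s₂ (by
            have hlen2 : (c :: cs).length = k'.length + s₂.length := by rw [← hs₂]; simp
            have hk'len : 0 < k'.length := List.length_pos_of_ne_nil hk'ne
            simp at hlen2 hs ⊢
            omega)]
          -- evaluate the RHS
          rw [show pvScan ((k,v)::t) (c :: cs) = v' ++ pvScan ((k,v)::t) (cs.drop (k'.length - 1)) by
                rw [pvScan]
                rw [List.find?_cons_of_neg (by simp [List.isPrefixOf_iff_prefix, hkp]), hf]]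
          have : cs.drop (k'.length - 1) = s₂ := by
            have hcs : cs = k'' ++ s₂ := by
              have htmp := hs₂
              rw [hdk] at htmp
              simp at htmp
              exact htmp.2.symm
            rw [hcs, hdk]
            simp
          rw [this]
        | none =>
          -- no key matches at this position: both sides copy one character
          rw [show pvScan1 k v (c :: cs) = c :: pvScan1 k v cs by
                rw [pvScan1]; simp [List.isPrefixOf_iff_prefix, hkp]]
          have hnone2 : t.find? (fun kv => kv.1.isPrefixOf (c :: pvScan1 k v cs)) = none := by
            rw [List.find?_eq_none]
            intro kv hkv
            simp only [List.isPrefixOf_iff_prefix]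
            intro hcon
            have himg : (c :: pvScan1 k v cs) = pvScan1 k v (c :: cs) := by
              rw [pvScan1]; simp [List.isPrefixOf_iff_prefix, hkp]
            rw [himg] at hcon
            have := pvQ k v kv.1
              (fun q h1 h2 => hA5 kv hkv q h1 h2)
              (c :: cs) 0 (fun _ => hkp)
              (by simpa using ht kv hkv)
              (by simpa using hcon)
            have hkvfail := List.find?_eq_none.mp hf kv hkv
            simp only [List.isPrefixOf_iff_prefix] at hkvfail
            exact hkvfail (by simpa using this)
          rw [pvScan, hnone2]
          rw [ih cs (by simp at hs; omega)]
          rw [show pvScan ((k,v)::t) (c :: cs) = c :: pvScan ((k,v)::t) cs by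
                rw [pvScan]
                rw [List.find?_cons_of_neg (by simp [List.isPrefixOf_iff_prefix, hkp]), hf]]

-- the decidable non-interference condition on a table, checked level by level
def pvOk : List (List Char × List Char) → Bool
  | [] => true
  | (k, v) :: t =>
      (!k.isEmpty) &&
      t.all (fun kv =>
        (List.range v.length).all (fun p =>
          !(kv.1.isPrefixOf (v.drop p)) && !((v.drop p).isPrefixOf kv.1)) &&
        (List.range kv.1.length).all (fun q =>
          (q == 0) ||
          (!(k.isPrefixOf (kv.1.drop q)) && !((kv.1.drop q).isPrefixOf k) &&
           !((kv.1.drop q).isPrefixOf v) && !(v.isPrefixOf (kv.1.drop q)))) &&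
        !(k.isPrefixOf kv.1) && !(kv.1.isPrefixOf k)) &&
      pvOk t

theorem pvNotPref {a b : List Char} (h : (!a.isPrefixOf b) = true) : ¬ a <+: b := by
  intro hc
  rw [List.isPrefixOf_iff_prefix.mpr hc] at h
  simp at h

theorem pvOk_nonnil : ∀ t, pvOk t = true → ∀ kv ∈ t, kv.1 ≠ [] := by
  intro t
  induction t with
  | nil => intro _ kv h; simp at h
  | cons hd tl ih =>
    obtain ⟨k, v⟩ := hd
    intro hok kv hkv
    rw [pvOk] at hok
    simp only [Bool.and_eq_true] at hok
    rcases List.mem_cons.mp hkv with hkv | hkv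
    · subst hkv; simpa [List.isEmpty_iff] using hok.1.1
    · exact ih hok.2 kv hkv

theorem pvOk_pair : ∀ t, pvOk t = true →
    t.Pairwise (fun a b => ¬ a.1 <+: b.1 ∧ ¬ b.1 <+: a.1) := by
  intro t
  induction t with
  | nil => intro _; exact List.Pairwise.nil
  | cons hd tl ih =>
    obtain ⟨k, v⟩ := hd
    intro hok
    rw [pvOk] at hok
    simp only [Bool.and_eq_true] at hok
    refine List.Pairwise.cons ?_ (ih hok.2)
    intro b hb
    have := (List.all_eq_true.mp hok.1.2) b hb
    simp only [Bool.and_eq_true] at this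
    exact ⟨pvNotPref this.1.2, pvNotPref this.2⟩

theorem pvChain : ∀ (t : List (List Char × List Char)), pvOk t = true →
    ∀ s, t.foldl (fun l kv => pvScan1 kv.1 kv.2 l) s = pvScan t s := by
  intro t
  induction t with
  | nil => intro _ s; simpa using (pvScan_nil_table s).symm
  | cons hd tl ih =>
    obtain ⟨k, v⟩ := hd
    intro hok s
    rw [pvOk] at hok
    simp only [Bool.and_eq_true] at hok
    have hall := List.all_eq_true.mp hok.1.2
    have hk : k ≠ [] := by simpa [List.isEmpty_iff] using hok.1.1
    have hstep := pvStep k v tl hk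
      (pvOk_nonnil tl hok.2)
      (by
        intro kv hkv p hp
        have := hall kv hkv
        simp only [Bool.and_eq_true] at this
        have h2 := (List.all_eq_true.mp this.1.1.1) p (List.mem_range.mpr hp)
        simp only [Bool.and_eq_true] at h2
        exact ⟨pvNotPref h2.1, pvNotPref h2.2⟩)
      (by
        intro kv hkv q h1 h2
        have := hall kv hkv
        simp only [Bool.and_eq_true] at this
        have h3 := (List.all_eq_true.mp this.1.1.2) q (List.mem_range.mpr h2)
        simp only [Bool.or_eq_true, Bool.and_eq_true, beq_iff_eq] at h3
        rcases h3 with h3 | h3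
        · omega
        · exact ⟨pvNotPref h3.1.1.1, pvNotPref h3.1.1.2⟩)
      (by
        intro kv hkv q h1 h2
        have := hall kv hkv
        simp only [Bool.and_eq_true] at this
        have h3 := (List.all_eq_true.mp this.1.1.2) q (List.mem_range.mpr h2)
        simp only [Bool.or_eq_true, Bool.and_eq_true, beq_iff_eq] at h3
        rcases h3 with h3 | h3
        · omega
        · exact ⟨pvNotPref h3.1.2, pvNotPref h3.2⟩)
      (by
        intro kv hkv
        have := hall kv hkv
        simp only [Bool.and_eq_true] at this
        exact ⟨pvNotPref this.1.2, pvNotPref this.2⟩)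
      (pvOk_pair tl hok.2)
    calc List.foldl (fun l kv => pvScan1 kv.1 kv.2 l) s ((k,v) :: tl)
        = List.foldl (fun l kv => pvScan1 kv.1 kv.2 l) (pvScan1 k v s) tl := by simp
      _ = pvScan tl (pvScan1 k v s) := ih hok.2 _
      _ = pvScan ((k,v) :: tl) s := hstep s.length s le_rfl

-- bridge: the string-level fold of Python replaces equals the char-level fold of pvScan1
theorem pvFoldBridge : ∀ (L : List (String × String)) (s : String),
    (∀ kv ∈ L, kv.1.toList ≠ []) →
    (L.foldl (fun s kv => PySem.Str.replace s kv.1 kv.2) s).toList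
      = (L.map (fun kv => (kv.1.toList, kv.2.toList))).foldl (fun l kv => pvScan1 kv.1 kv.2 l) s.toList := by
  intro L
  induction L with
  | nil => intro s _; simp
  | cons hd tl ih =>
    intro s hne
    have hhd : hd.1.toList ≠ [] := hne hd (by simp)
    calc (List.foldl (fun s kv => PySem.Str.replace s kv.1 kv.2) s (hd :: tl)).toList
        = (List.foldl (fun s kv => PySem.Str.replace s kv.1 kv.2)
            (PySem.Str.replace s hd.1 hd.2) tl).toList := by simp
      _ = (tl.map (fun kv => (kv.1.toList, kv.2.toList))).foldl (fun l kv => pvScan1 kv.1 kv.2 l)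
            (PySem.Str.replace s hd.1 hd.2).toList := ih _ (fun kv h => hne kv (by simp [h]))
      _ = _ := by
            rw [PySem.Str.toList_replace, pv_replace_eq _ _ _ hhd]
            simp

-- B's triple-built table spells out to exactly A's key/value pairs (char-level)
set_option maxHeartbeats 4000000 in
theorem pvTables_agree :
    pvTable = pvConvDict.map (fun kv => (kv.1.toList, kv.2.toList)) := by decide

set_option maxHeartbeats 4000000 in
theorem pvOk_table : pvOk pvTable = true := by decide

-- ===== VERDICT (by name: the statement is the Claim_ definition above) =====
theorem convert_dst_spec : Claim_equal_convert_dst := by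
  intro proj _
  unfold Spec_convert_dst convert_dst convert_dst_alt
  have h1 := pvFoldBridge pvConvDict proj (by decide)
  have h2 := pvChain pvTable pvOk_table proj.toList
  have h3 : (pvConvDict.foldl (fun s kv => PySem.Str.replace s kv.1 kv.2) proj).toList
      = pvScan pvTable proj.toList := by
    rw [h1, ← pvTables_agree]
    exact h2
  calc pvConvDict.foldl (fun s kv => PySem.Str.replace s kv.1 kv.2) proj
      = String.ofList (pvConvDict.foldl (fun s kv => PySem.Str.replace s kv.1 kv.2) proj).toList := by
        rw [String.ofList_toList]
    _ = String.ofList (pvScan pvTable proj.toList) := by rw [h3]
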